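-- pv_equiv track=rewrite | github.com/israel-dryer/ttkbootstrap | src/ttkbootstrap/core/localization/msgcat.py | _strip_ampersands
-- ===== SOURCE A (Python) =====
-- def _strip_ampersands(s: str) -> str:
--     """Remove mnemonic ampersands from text.
--
--     Converts single '&' markers to nothing and turns '&&' into a
--     literal '&'. Useful for rendering toolkit-agnostic text.
--
--     Args:
--         s: Input string.
--
--     Returns:
--         Cleaned string with mnemonic indicators removed.
--     """
--     if not s or "&" not in s:
--         return s
--     out = []
--     i = 0
--     while i < len(s):
--         if s[i] == "&":
--             if i + 1 < len(s) and s[i + 1] == "&":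
--                 out.append("&")
--                 i += 2
--             else:
--                 i += 1  # skip mnemonic marker
--         else:
--             out.append(s[i])
--             i += 1
--     return "".join(out)
-- ===== SOURCE B (Python) =====
-- def _strip_ampersands(s: str) -> str:
--     return "&".join(p.replace("&", "") for p in s.split("&&"))
-- ===== Notes on version B (the rewrite author's own statement) =====
-- stated objective: idiomatic
-- what changed: Replaces the explicit index-pointer character scan with a split('&&') / replace('&','') / '&'.join pipeline over segments.
import Mathlib
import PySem

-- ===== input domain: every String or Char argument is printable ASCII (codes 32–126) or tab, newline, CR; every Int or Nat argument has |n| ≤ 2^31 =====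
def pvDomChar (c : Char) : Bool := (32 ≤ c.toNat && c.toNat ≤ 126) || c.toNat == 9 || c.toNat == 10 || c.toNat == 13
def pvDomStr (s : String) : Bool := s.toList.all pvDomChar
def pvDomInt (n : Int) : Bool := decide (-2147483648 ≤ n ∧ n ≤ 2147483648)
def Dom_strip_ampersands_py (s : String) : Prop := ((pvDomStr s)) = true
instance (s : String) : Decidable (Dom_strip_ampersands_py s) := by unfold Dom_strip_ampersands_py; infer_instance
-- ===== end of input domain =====

-- B replaces A's explicit index-pointer scan with a split-on-"&&" / drop-lone-'&' / join-with-'&' pipeline (idiomatic, same cost).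


-- ===== PORT A =====
-- the while loop over index i: consume '&&' → emit '&'; lone '&' → skip; other char → emit
def stripLoopA : List Char → List Char
  | [] => []
  | '&' :: '&' :: r => '&' :: stripLoopA r
  | '&' :: r => stripLoopA r
  | c :: r => c :: stripLoopA r

def strip_ampersands_py (s : String) : String :=
  if s.toList = [] ∨ '&' ∉ s.toList then s
  else String.ofList (stripLoopA s.toList)

-- ===== PORT B =====
-- s.split("&&"): split the character list on occurrences of the two-char separator
def splitAmpAmp : List Char → List (List Char)
  | [] => [[]]
  | '&' :: '&' :: r => [] :: splitAmpAmp r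
  | c :: r =>
    match splitAmpAmp r with
    | [] => [[c]]
    | p :: ps => (c :: p) :: ps

-- "&".join(parts)
def joinAmp : List (List Char) → List Char
  | [] => []
  | [p] => p
  | p :: ps => p ++ '&' :: joinAmp ps

def strip_ampersands_py_alt (s : String) : String :=
  String.ofList (joinAmp ((splitAmpAmp s.toList).map (List.filter (fun c => c ≠ '&'))))

-- ===== PRECONDITION & SPEC =====
def Spec_strip_ampersands_py (s : String) (out : String) : Prop := out = strip_ampersands_py_alt s
instance (s : String) (out : String) : Decidable (Spec_strip_ampersands_py s out) := by unfold Spec_strip_ampersands_py; infer_instance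

-- ===== CLAIM (what is proved, stated in full; the proofs are below) =====
def Claim_equal_strip_ampersands_py : Prop := ∀ (s : String), Dom_strip_ampersands_py s → Spec_strip_ampersands_py s (strip_ampersands_py s)

-- ===== LEMMAS AND PROOFS =====

theorem splitAmpAmp_ne_nil (l : List Char) : splitAmpAmp l ≠ [] := by
  fun_induction splitAmpAmp l <;> simp

theorem joinAmp_cons_cons (a : Char) (x : List Char) (xs : List (List Char)) :
    joinAmp ((a :: x) :: xs) = a :: joinAmp (x :: xs) := by
  cases xs <;> simp [joinAmp]

theorem stripLoopA_cons_ne (c : Char) (r : List Char) (hc : c ≠ '&') :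
    stripLoopA (c :: r) = c :: stripLoopA r := by
  rw [stripLoopA.eq_def]; split <;> simp_all

theorem stripLoopA_amp (r : List Char) (hr : ∀ t, r ≠ '&' :: t) :
    stripLoopA ('&' :: r) = stripLoopA r := by
  cases r with
  | nil => simp [stripLoopA]
  | cons d t =>
    have hd : d ≠ '&' := fun h => hr t (by rw [h])
    rw [stripLoopA.eq_def]
    split <;> simp_all
    rename_i hne heq
    exact hne heq.1.symm

-- the loop of A computes exactly B's split/filter/join
theorem loopA_eq_pipeline (l : List Char) :
    stripLoopA l = joinAmp ((splitAmpAmp l).map (List.filter (fun c => c ≠ '&'))) := by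
  fun_induction splitAmpAmp l with
  | case1 => simp [stripLoopA, joinAmp]
  | case2 r ih =>
    cases h : splitAmpAmp r with
    | nil => exact absurd h (splitAmpAmp_ne_nil r)
    | cons p ps =>
      rw [h] at ih
      simp only [stripLoopA, ih, List.map]
      cases ps <;> simp [joinAmp]
  | case3 c r h1 h2 => exact absurd h2 (splitAmpAmp_ne_nil r)
  | case4 c r h1 p ps h ih =>
    rw [h] at ih
    by_cases hc : c = '&'
    · subst hc
      have hr : ∀ t, r ≠ '&' :: t := fun t ht => h1 t rfl ht
      rw [stripLoopA_amp r hr, ih]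
      simp [List.filter]
    · rw [stripLoopA_cons_ne c r hc, ih]
      have : List.filter (fun c => decide (c ≠ '&')) (c :: p)
          = c :: List.filter (fun c => decide (c ≠ '&')) p := by
        simp [List.filter, hc]
      simp only [List.map, this]
      exact (joinAmp_cons_cons c _ _).symm

theorem loopA_no_amp (l : List Char) (h : '&' ∉ l) : stripLoopA l = l := by
  induction l with
  | nil => rfl
  | cons c r ih =>
    have hc : c ≠ '&' := fun hc => h (hc ▸ List.mem_cons_self ..)
    rw [stripLoopA_cons_ne c r hc, ih (fun hm => h (List.mem_cons_of_mem _ hm))]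

-- ===== VERDICT (by name: the statement is the Claim_ definition above) =====
theorem strip_ampersands_py_spec : Claim_equal_strip_ampersands_py := by
  intro s _
  unfold Spec_strip_ampersands_py strip_ampersands_py strip_ampersands_py_alt
  rw [← loopA_eq_pipeline]
  split
  · rename_i h
    rcases h with h | h
    · have h' : stripLoopA s.toList = s.toList := by rw [h]; simp [stripLoopA]
      rw [h']; exact String.ofList_toList.symm
    · rw [loopA_no_amp _ h]
      exact String.ofList_toList.symm
  · rfl
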